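-- pv_equiv track=rewrite | github.com/janalex/leetcode | dailyqs/2037_min_moves.py | minMovesToSeat
-- ===== SOURCE A (Python) =====
-- import heapq
-- from typing import List
--
-- def minMovesToSeat(seats: List[int], students: List[int]) -> int:
--     heapq.heapify(seats)
--     heapq.heapify(students)
--     result = 0
--     while seats:
--         seat = heapq.heappop(seats)
--         student = heapq.heappop(students)
--         result += abs(seat - student)
--     return result
-- ===== SOURCE B (Python) =====
-- def minMovesToSeat(seats, students):
--     return sum(abs(a - b) for a, b in zip(sorted(seats), sorted(students)))
-- ===== Notes on version B (the rewrite author's own statement) =====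
-- stated objective: idiomatic
-- what changed: Replaces the two binary heaps and the pop loop with wholesale sorting of both lists followed by one zipped pairwise pass summing absolute differences; no priority queue is maintained and nothing is popped (same O(n log n), but the per-element Python-level heappop calls disappear into C-level sorted/sum).
import Mathlib
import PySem

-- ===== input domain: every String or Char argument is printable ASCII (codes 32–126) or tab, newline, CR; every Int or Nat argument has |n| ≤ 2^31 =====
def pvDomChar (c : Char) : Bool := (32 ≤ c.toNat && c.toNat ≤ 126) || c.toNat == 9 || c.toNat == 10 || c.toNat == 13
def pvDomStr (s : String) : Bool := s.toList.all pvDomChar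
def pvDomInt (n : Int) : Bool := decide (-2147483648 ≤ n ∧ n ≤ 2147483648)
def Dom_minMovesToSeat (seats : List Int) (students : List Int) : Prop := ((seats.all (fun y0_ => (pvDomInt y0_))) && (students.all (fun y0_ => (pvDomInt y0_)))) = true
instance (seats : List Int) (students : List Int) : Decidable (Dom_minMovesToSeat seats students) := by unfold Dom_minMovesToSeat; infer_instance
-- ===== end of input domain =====

-- B replaces A's two heaps + pop loop with sorting both lists and one zipped pairwise sum
-- (idiomatic, same return value; RETURN-value equivalence only: A empties both argument
-- lists in place while B leaves them intact).

-- ===== PORT A =====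
-- heapq is modelled at the value level: heappop returns the minimum of the list and removes
-- one occurrence of it — exact for the returned value (Int duplicates are indistinguishable).
-- Fuel = seats.length transcribes 'while seats' (each iteration removes exactly one seat);
-- the unreachable branch (students exhausted first) is excluded by Pre_ (Python raises there).
def pvHeapLoop : Nat → List Int → List Int → Int → Int
  | 0, _, _, r => r
  | n+1, seats, students, r =>
    match PySem.List.min? seats (fun x => x), PySem.List.min? students (fun x => x) with
    | some seat, some student =>
        pvHeapLoop n (seats.erase seat) (students.erase student) (r + |seat - student|)
    | _, _ => r

def minMovesToSeat (seats : List Int) (students : List Int) : Int :=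
  pvHeapLoop seats.length seats students 0

-- ===== PORT B =====
def minMovesToSeat_alt (seats : List Int) (students : List Int) : Int :=
  (List.zipWith (fun a b => |a - b|)
    (PySem.List.sorted seats (fun x => x) false)
    (PySem.List.sorted students (fun x => x) false)).sum

-- ===== PRECONDITION & SPEC =====
-- Pre_ excludes exactly the inputs where A raises IndexError: fewer students than seats
-- (the students heap is popped empty).
def Pre_minMovesToSeat (seats : List Int) (students : List Int) : Prop :=
  seats.length ≤ students.length
instance (seats : List Int) (students : List Int) : Decidable (Pre_minMovesToSeat seats students) := by unfold Pre_minMovesToSeat; infer_instance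

def pvWitness_minMovesToSeat : List Int × List Int := ([2, 1, 4], [0, 3, 5])

def Spec_minMovesToSeat (seats : List Int) (students : List Int) (out : Int) : Prop := out = minMovesToSeat_alt seats students
instance (seats : List Int) (students : List Int) (out : Int) : Decidable (Spec_minMovesToSeat seats students out) := by unfold Spec_minMovesToSeat; infer_instance

-- ===== CLAIM (what is proved, stated in full; the proofs are below) =====
def Claim_equal_minMovesToSeat : Prop := ∀ (seats : List Int) (students : List Int), Dom_minMovesToSeat seats students → Pre_minMovesToSeat seats students → Spec_minMovesToSeat seats students (minMovesToSeat seats students)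

-- ===== LEMMAS AND PROOFS =====

-- the sorted list is the minimum followed by the sorted list with one occurrence of it removed
theorem pv_sorted_cons_erase (xs : List Int) (m : Int)
    (hm : PySem.List.min? xs (fun x => x) = some m) :
    PySem.List.sorted xs (fun x => x) false =
      m :: PySem.List.sorted (xs.erase m) (fun x => x) false := by
  have hmem : m ∈ xs := PySem.List.min?_mem hm
  have hperm : (m :: PySem.List.sorted (xs.erase m) (fun x => x) false).Perm xs :=
    (List.Perm.cons m (PySem.List.sorted_perm _ _ _)).trans (List.perm_cons_erase hmem).symm
  refine PySem.List.sorted_id_eq_of_perm_of_pairwise _ _ hperm ?_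
  refine List.pairwise_cons.mpr ⟨?_, ?_⟩
  · intro y hy
    have : y ∈ xs.erase m := (PySem.List.mem_sorted _ _ _ _).1 hy
    exact PySem.List.min?_isMin hm y (List.mem_of_mem_erase this)
  · exact PySem.List.sorted_pairwise _ _

theorem pv_loop (n : Nat) : ∀ (seats students : List Int) (r : Int),
    seats.length = n → seats.length ≤ students.length →
    pvHeapLoop n seats students r = r + minMovesToSeat_alt seats students := by
  induction n with
  | zero =>
    intro seats students r hlen _
    have hs : seats = [] := List.length_eq_zero_iff.mp hlen
    subst hs
    simp [pvHeapLoop, minMovesToSeat_alt, PySem.List.sorted]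
  | succ n ih =>
    intro seats students r hlen hle
    have hs : seats ≠ [] := by
      intro h; subst h; simp at hlen
    have ht : students ≠ [] := by
      intro h; subst h
      have : seats.length ≤ 0 := by simpa using hle
      omega
    obtain ⟨a, ha⟩ := Option.ne_none_iff_exists'.mp
      (fun h => hs ((PySem.List.min?_eq_none_iff seats (fun x : Int => x)).mp h))
    obtain ⟨b, hb⟩ := Option.ne_none_iff_exists'.mp
      (fun h => ht ((PySem.List.min?_eq_none_iff students (fun x : Int => x)).mp h))
    have hamem : a ∈ seats := PySem.List.min?_mem ha
    have hbmem : b ∈ students := PySem.List.min?_mem hb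
    have hlen' : (seats.erase a).length = n := by
      rw [List.length_erase_of_mem hamem]; omega
    have hle' : (seats.erase a).length ≤ (students.erase b).length := by
      rw [List.length_erase_of_mem hamem, List.length_erase_of_mem hbmem]; omega
    have step : pvHeapLoop (n+1) seats students r =
        pvHeapLoop n (seats.erase a) (students.erase b) (r + |a - b|) := by
      simp [pvHeapLoop, ha, hb]
    rw [step, ih _ _ _ hlen' hle']
    unfold minMovesToSeat_alt
    rw [pv_sorted_cons_erase seats a ha, pv_sorted_cons_erase students b hb]
    simp [List.zipWith]
    ring

-- ===== VERDICT (by name: the statement is the Claim_ definition above) =====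
theorem minMovesToSeat_spec : Claim_equal_minMovesToSeat := by
  intro seats students _ hpre
  unfold Spec_minMovesToSeat minMovesToSeat
  rw [pv_loop seats.length seats students 0 rfl hpre]
  simp
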